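-- pv_equiv track=rewrite | github.com/cafaray/atco.de-fights | evenNumbersBeforeFixed1.py | evenNumbersBeforeFixed
-- ===== SOURCE A (Python) =====
-- def evenNumbersBeforeFixed(sequence, fixedElement):
--     r=0
--     f=False
--     for e in sequence:
--         if e==fixedElement:
--             f=True
--             break
--         if e%2==0:
--             r+=1
--     return -1 if not f else r
-- ===== SOURCE B (Python) =====
-- def evenNumbersBeforeFixed(sequence, fixedElement):
--     # Backward scan with reset: acc = -1 means "no fixedElement seen yet in the
--     # suffix"; each occurrence resets acc to 0, so the leftmost occurrence wins,
--     # and evens seen while acc is live end up counted exactly when they lie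
--     # before the first occurrence.
--     acc = -1
--     for e in reversed(sequence):
--         if e == fixedElement:
--             acc = 0
--         elif acc != -1 and e % 2 == 0:
--             acc += 1
--     return acc
-- ===== Notes on version B (the rewrite author's own statement) =====
-- stated objective: alternative
-- what changed: A's forward scan that breaks at the first match is replaced by a backward scan over reversed(sequence) with a single accumulator that resets to 0 at each occurrence (so the leftmost occurrence wins) and counts evens only while live; no break, no flag, opposite traversal order.
import Mathlib
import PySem

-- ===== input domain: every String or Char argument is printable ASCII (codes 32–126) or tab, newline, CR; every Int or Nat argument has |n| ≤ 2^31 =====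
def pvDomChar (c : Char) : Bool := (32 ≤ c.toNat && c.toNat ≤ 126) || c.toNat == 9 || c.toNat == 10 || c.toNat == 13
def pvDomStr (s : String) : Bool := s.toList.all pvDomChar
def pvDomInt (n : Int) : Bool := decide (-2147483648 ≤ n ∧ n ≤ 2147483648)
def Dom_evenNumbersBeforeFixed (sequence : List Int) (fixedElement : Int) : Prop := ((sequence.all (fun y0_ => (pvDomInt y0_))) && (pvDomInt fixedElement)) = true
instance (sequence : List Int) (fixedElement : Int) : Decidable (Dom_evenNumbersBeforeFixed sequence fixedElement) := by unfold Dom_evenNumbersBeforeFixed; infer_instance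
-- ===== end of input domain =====

-- B replaces A's forward break-on-first-match scan by a backward scan with a reset-on-occurrence accumulator (alternative traversal, same cost).

-- ===== PORT A =====
-- A's loop: accumulator r, breaking on the first e == fixedElement; falling off the end returns -1.
def evenNumbersBeforeFixedLoop (fixedElement : Int) : List Int → Int → Int
  | [], _ => -1
  | e :: rest, r =>
      if e == fixedElement then r
      else evenNumbersBeforeFixedLoop fixedElement rest
            (if PySem.Int.mod e 2 == 0 then r + 1 else r)

def evenNumbersBeforeFixed (sequence : List Int) (fixedElement : Int) : Int :=
  evenNumbersBeforeFixedLoop fixedElement sequence 0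

-- ===== PORT B =====
-- B's step: reset to 0 on a match, count evens while acc is live (≠ -1).
def evenNumbersBeforeFixedStep (fixedElement : Int) (acc : Int) (e : Int) : Int :=
  if e == fixedElement then 0
  else if (!(acc == -1)) && (PySem.Int.mod e 2 == 0) then acc + 1
  else acc

def evenNumbersBeforeFixed_alt (sequence : List Int) (fixedElement : Int) : Int :=
  sequence.reverse.foldl (evenNumbersBeforeFixedStep fixedElement) (-1)

-- ===== PRECONDITION & SPEC =====
def Spec_evenNumbersBeforeFixed (sequence : List Int) (fixedElement : Int) (out : Int) : Prop := out = evenNumbersBeforeFixed_alt sequence fixedElement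
instance (sequence : List Int) (fixedElement : Int) (out : Int) : Decidable (Spec_evenNumbersBeforeFixed sequence fixedElement out) := by unfold Spec_evenNumbersBeforeFixed; infer_instance

-- ===== CLAIM (what is proved, stated in full; the proofs are below) =====
def Claim_equal_evenNumbersBeforeFixed : Prop := ∀ (sequence : List Int) (fixedElement : Int), Dom_evenNumbersBeforeFixed sequence fixedElement → Spec_evenNumbersBeforeFixed sequence fixedElement (evenNumbersBeforeFixed sequence fixedElement)

-- ===== LEMMAS AND PROOFS =====

-- B's fold decomposed at the head of the original list.
theorem alt_cons (f e : Int) (rest : List Int) :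
    evenNumbersBeforeFixed_alt (e :: rest) f
      = evenNumbersBeforeFixedStep f (evenNumbersBeforeFixed_alt rest f) e := by
  simp [evenNumbersBeforeFixed_alt, List.reverse_cons, List.foldl_append]

-- B's accumulator never goes below -1.
theorem alt_ge (f : Int) (l : List Int) : -1 ≤ evenNumbersBeforeFixed_alt l f := by
  induction l with
  | nil => simp [evenNumbersBeforeFixed_alt]
  | cons e rest ih =>
    rw [alt_cons]
    unfold evenNumbersBeforeFixedStep
    split
    · omega
    · split <;> omega

-- A's loop with accumulator r computes -1 where B does, and r + B's value otherwise.
theorem loop_eq_alt (f : Int) (l : List Int) (r : Int) :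
    evenNumbersBeforeFixedLoop f l r
      = (if evenNumbersBeforeFixed_alt l f = -1 then -1
         else r + evenNumbersBeforeFixed_alt l f) := by
  induction l generalizing r with
  | nil => simp [evenNumbersBeforeFixedLoop, evenNumbersBeforeFixed_alt]
  | cons e rest ih =>
    rw [alt_cons]
    unfold evenNumbersBeforeFixedStep
    by_cases he : e = f
    · simp [evenNumbersBeforeFixedLoop, he]
    · have ha := alt_ge f rest
      have hstep : evenNumbersBeforeFixedLoop f (e :: rest) r
          = evenNumbersBeforeFixedLoop f rest
              (if PySem.Int.mod e 2 == 0 then r + 1 else r) := by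
        simp [evenNumbersBeforeFixedLoop, he]
      rw [hstep, ih]
      by_cases hm : PySem.Int.mod e 2 == 0 <;>
        by_cases hn : evenNumbersBeforeFixed_alt rest f = -1 <;>
        simp [he, hm, hn] <;> split_ifs <;> omega

-- ===== VERDICT (by name: the statement is the Claim_ definition above) =====
theorem evenNumbersBeforeFixed_spec : Claim_equal_evenNumbersBeforeFixed := by
  intro sequence fixedElement _
  unfold Spec_evenNumbersBeforeFixed evenNumbersBeforeFixed
  rw [loop_eq_alt]
  split <;> omega
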